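-- pv_equiv track=rewrite | github.com/almatzhezbayev/ubs_solutions | app/safeguard.py | encode_mirror_alphabet
-- ===== SOURCE A (Python) =====
-- def encode_mirror_alphabet(x: str) -> str:
--     """Replace each letter with its mirror in the alphabet"""
--     result = []
--     for char in x:
--         if char.isalpha():
--             if char.islower():
--                 result.append(chr(219 - ord(char)))  # a=97, z=122 -> 219-97=122, 219-122=97
--             else:
--                 result.append(chr(155 - ord(char)))  # A=65, Z=90 -> 155-65=90, 155-90=65
--         else:
--             result.append(char)
--     return ''.join(result)
-- ===== SOURCE B (Python) =====
-- # B: divide-and-conquer recursion on string halves; the single-char base case mirrors a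
-- # letter by finding its position in the alphabet and reading the reversed alphabet at the
-- # same position (no ord/chr arithmetic, no linear scan loop).
-- LOWER = "abcdefghijklmnopqrstuvwxyz"
-- REV_L = LOWER[::-1]
-- UPPER = LOWER.upper()
-- REV_U = REV_L.upper()
--
-- def encode_mirror_alphabet(x: str) -> str:
--     if len(x) <= 1:
--         if len(x) == 0:
--             return x
--         i = LOWER.find(x)
--         if i >= 0:
--             return REV_L[i]
--         j = UPPER.find(x)
--         if j >= 0:
--             return REV_U[j]
--         return x
--     m = len(x) // 2
--     return encode_mirror_alphabet(x[:m]) + encode_mirror_alphabet(x[m:])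
-- ===== Notes on version B (the rewrite author's own statement) =====
-- stated objective: alternative
-- what changed: Replaces A's linear isalpha/islower branch loop with chr(219-ord)/chr(155-ord) arithmetic by a divide-and-conquer recursion that splits the string in half and, at single characters, mirrors a letter by finding its position in the alphabet string and reading the reversed alphabet at that position (no ord/chr arithmetic).
import Mathlib
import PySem

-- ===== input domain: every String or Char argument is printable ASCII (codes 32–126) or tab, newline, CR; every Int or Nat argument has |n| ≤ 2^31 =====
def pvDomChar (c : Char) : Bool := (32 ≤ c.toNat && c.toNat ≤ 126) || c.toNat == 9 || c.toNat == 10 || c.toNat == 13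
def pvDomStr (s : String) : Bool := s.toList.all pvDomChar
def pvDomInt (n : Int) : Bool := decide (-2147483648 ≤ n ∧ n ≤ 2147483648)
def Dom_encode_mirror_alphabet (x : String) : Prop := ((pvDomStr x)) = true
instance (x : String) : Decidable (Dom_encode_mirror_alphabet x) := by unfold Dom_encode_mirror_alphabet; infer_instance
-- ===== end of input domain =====

set_option maxRecDepth 8000


-- B replaces A's linear branch loop with ord/chr arithmetic by a divide-and-conquer
-- recursion whose base case mirrors a letter via positional lookup in the reversed
-- alphabet (alternative decomposition; same result).

-- ===== PORT A =====
-- per-iteration body of A's loop: the isalpha/islower branch choosing what to append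
def pvMirrorStepA (result : List Char) (c : Char) : List Char :=
  if PySem.Chars.isalpha c then
    if PySem.Chars.islower c then
      result ++ [Char.ofNat (219 - c.toNat)]
    else
      result ++ [Char.ofNat (155 - c.toNat)]
  else
    result ++ [c]

def encode_mirror_alphabet (x : String) : String :=
  String.ofList (x.toList.foldl pvMirrorStepA [])

-- ===== PORT B =====
-- LOWER = "abcdefghijklmnopqrstuvwxyz"
def pvLower : List Char := "abcdefghijklmnopqrstuvwxyz".toList
-- REV_L = LOWER[::-1]  (slice?_none_none_neg_one: [::-1] is reverse, exact)
def pvRevL : List Char := pvLower.reverse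
-- UPPER = LOWER.upper();  REV_U = REV_L.upper()
def pvUpper : List Char := PySem.Chars.upper pvLower
def pvRevU : List Char := PySem.Chars.upper pvRevL

-- base case of B: mirror one char by position in the reversed alphabet.
-- REV_L[i] is ported as pyGetD with default c: the index is in 0..25 when taken,
-- so Python never raises there and the default is never used (exact).
def pvMirrorB (c : Char) : Char :=
  let i := PySem.Chars.find pvLower [c]
  if 0 ≤ i then PySem.List.pyGetD pvRevL i c
  else
    let j := PySem.Chars.find pvUpper [c]
    if 0 ≤ j then PySem.List.pyGetD pvRevU j c
    else c

-- divide and conquer on the char list: x[:m] / x[m:] with 0 ≤ m ≤ len are take/drop (exact)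
def pvGoB (s : List Char) : List Char :=
  if _h : s.length ≤ 1 then
    match s with
    | [] => []
    | c :: _ => [pvMirrorB c]
  else
    pvGoB (s.take (s.length / 2)) ++ pvGoB (s.drop (s.length / 2))
termination_by s.length
decreasing_by
  · simp only [List.length_take]; omega
  · simp only [List.length_drop]; omega

def encode_mirror_alphabet_alt (x : String) : String :=
  String.ofList (pvGoB x.toList)

-- ===== PRECONDITION & SPEC =====
def Spec_encode_mirror_alphabet (x : String) (out : String) : Prop := out = encode_mirror_alphabet_alt x
instance (x : String) (out : String) : Decidable (Spec_encode_mirror_alphabet x out) := by unfold Spec_encode_mirror_alphabet; infer_instance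

-- ===== CLAIM (what is proved, stated in full; the proofs are below) =====
def Claim_equal_encode_mirror_alphabet : Prop := ∀ (x : String), Dom_encode_mirror_alphabet x → Spec_encode_mirror_alphabet x (encode_mirror_alphabet x)

-- ===== LEMMAS AND PROOFS =====

-- B's recursion computes the per-character map
lemma pvGoB_eq_map (s : List Char) : pvGoB s = s.map pvMirrorB := by
  induction s using pvGoB.induct with
  | case1 s h => simp [pvGoB]
  | case2 s h c rest => rw [pvGoB]; simp_all
  | case3 s h ih1 ih2 =>
    rw [pvGoB]
    simp only [h, dite_false]
    rw [ih1, ih2, ← List.map_append, List.take_append_drop]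

-- per-character agreement on all 127 domain codes
lemma pv_char_agree_nat : ∀ n : Nat, n < 127 →
    pvMirrorStepA [] (Char.ofNat n) = [pvMirrorB (Char.ofNat n)] := by
  intro n hn
  interval_cases n <;> decide

lemma pv_char_agree (c : Char) (h : pvDomChar c = true) (acc : List Char) :
    pvMirrorStepA acc c = acc ++ [pvMirrorB c] := by
  have hlt : c.toNat < 127 := by simp [pvDomChar] at h; omega
  have hc : Char.ofNat c.toNat = c := Char.ofNat_toNat c
  have h0 := pv_char_agree_nat c.toNat hlt
  rw [hc] at h0
  have hsplit : pvMirrorStepA acc c = acc ++ pvMirrorStepA [] c := by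
    simp only [pvMirrorStepA]; split_ifs <;> simp
  rw [hsplit, h0]

-- ===== VERDICT (by name: the statement is the Claim_ definition above) =====
theorem encode_mirror_alphabet_spec : Claim_equal_encode_mirror_alphabet := by
  intro x hx
  unfold Spec_encode_mirror_alphabet encode_mirror_alphabet encode_mirror_alphabet_alt
  rw [pvGoB_eq_map]
  have hfold : x.toList.foldl pvMirrorStepA [] = x.toList.map pvMirrorB := by
    have := PySem.List.foldl_congr_mem (l := x.toList) (init := ([] : List Char))
      (f := pvMirrorStepA) (g := fun acc c => acc ++ [pvMirrorB c]) ?_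
    · rw [this, PySem.List.foldl_append_singleton_eq_map]; exact List.nil_append _
    · intro acc c hc
      exact pv_char_agree c (by
        simp only [Dom_encode_mirror_alphabet, pvDomStr, List.all_eq_true] at hx; exact hx c hc) acc
  rw [hfold]
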